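-- pv_equiv track=rewrite | github.com/jodermo/UnrealEngineGameServer | DjangoBackend/generate_components.py | write_serializer
-- ===== SOURCE A (Python) =====
-- def write_serializer(name, fields):
--     nested_lines = ""
--     serializer_code = f"class {name}Serializer(serializers.ModelSerializer):\n"
--
--     for field_name, field_type in fields.items():
--         # Handle ForeignKey relationships by injecting nested serializers
--         if "ForeignKey(" in field_type:
--             related_model = field_type.split("ForeignKey(")[1].split(",")[0].strip("'\"")
--             serializer_code += f"    {field_name} = {related_model}Serializer(read_only=True)\n"
--             nested_lines += f"\n\n{write_serializer(related_model, {})}"  # Dummy fields for now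
--
--     serializer_code += "    class Meta:\n"
--     serializer_code += f"        model = {name}\n"
--     serializer_code += "        fields = '__all__'\n"
--
--     return serializer_code + nested_lines
-- ===== SOURCE B (Python) =====
-- def write_serializer(name, fields):
--     fks = [
--         (fn, ft.split("ForeignKey(")[1].split(",")[0].strip("'\""))
--         for fn, ft in fields.items()
--         if "ForeignKey(" in ft
--     ]
--     body = "".join(f"    {fn} = {rm}Serializer(read_only=True)\n" for fn, rm in fks)
--     nested = "".join(
--         f"\n\nclass {rm}Serializer(serializers.ModelSerializer):\n"
--         "    class Meta:\n"
--         f"        model = {rm}\n"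
--         "        fields = '__all__'\n"
--         for _, rm in fks
--     )
--     return (
--         f"class {name}Serializer(serializers.ModelSerializer):\n"
--         + body
--         + "    class Meta:\n"
--         + f"        model = {name}\n"
--         + "        fields = '__all__'\n"
--         + nested
--     )
-- ===== Notes on version B (the rewrite author's own statement) =====
-- stated objective: simpler
-- what changed: Removed A's self-recursive call and dual in-loop string accumulators: B does one filter/map pass over the fields and joins the main lines and the nested serializer blocks from an inlined closed-form template (the constant string A's recursive call with {} produces); Pre_ only excludes fields lists with duplicate keys, which do not represent a Python dict.
import Mathlib
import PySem

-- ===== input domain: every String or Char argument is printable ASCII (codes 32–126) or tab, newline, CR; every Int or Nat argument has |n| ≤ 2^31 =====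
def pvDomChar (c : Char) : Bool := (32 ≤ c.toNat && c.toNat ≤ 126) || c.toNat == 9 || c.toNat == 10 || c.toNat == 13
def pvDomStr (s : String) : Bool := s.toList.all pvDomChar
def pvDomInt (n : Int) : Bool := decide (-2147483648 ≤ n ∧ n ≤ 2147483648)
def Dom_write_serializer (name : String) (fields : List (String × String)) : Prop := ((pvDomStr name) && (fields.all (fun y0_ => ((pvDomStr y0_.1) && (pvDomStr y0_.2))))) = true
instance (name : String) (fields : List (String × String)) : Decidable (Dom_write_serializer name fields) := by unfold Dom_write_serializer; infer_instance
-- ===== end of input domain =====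

-- B rewrites A without its self-recursive call: one filter/map pass and join of a
-- closed-form nested template (objective: simpler, same cost).

-- ft.split("ForeignKey(")[1].split(",")[0].strip("'\"") — identical expression in both Pythons.
-- The `.getD` defaults are totality guards only: both indices are in range whenever
-- "ForeignKey(" occurs in ft, which is the only context this helper is called in.
def pvRelated (ft : String) : String :=
  let after := ((PySem.Str.split? ft "ForeignKey(").getD []).getD 1 ""
  let first := ((PySem.Str.split? after ",").getD []).getD 0 ""
  PySem.Str.stripChars first "'\""

-- ===== PORT A =====
-- A recurses with `{}` as the fields of the nested call; `fuel` (= recursion depth bound 1)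
-- is a totality guard only: the `| 0 => ""` branch is unreachable because the inner call
-- always receives `[]`, whose loop body never runs.
def wsFuel : Nat → String → List (String × String) → String
  | fuel, name, fields =>
    let acc := fields.foldl
      (fun (acc : String × String) fp =>
        if PySem.Str.isIn "ForeignKey(" fp.2 then
          let rm := pvRelated fp.2
          (acc.1 ++ ("    " ++ fp.1 ++ " = " ++ rm ++ "Serializer(read_only=True)\n"),
           acc.2 ++ ("\n\n" ++ (match fuel with | 0 => "" | f+1 => wsFuel f rm [])))
        else acc)
      ("class " ++ name ++ "Serializer(serializers.ModelSerializer):\n", "")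
    (((acc.1 ++ "    class Meta:\n") ++ ("        model = " ++ name ++ "\n")) ++ "        fields = '__all__'\n") ++ acc.2

def write_serializer (name : String) (fields : List (String × String)) : String :=
  wsFuel 1 name fields

-- ===== PORT B =====
def write_serializer_alt (name : String) (fields : List (String × String)) : String :=
  let fks := (fields.filter (fun p => PySem.Str.isIn "ForeignKey(" p.2)).map (fun p => (p.1, pvRelated p.2))
  let body := PySem.Str.join "" (fks.map (fun p => "    " ++ p.1 ++ " = " ++ p.2 ++ "Serializer(read_only=True)\n"))
  let nested := PySem.Str.join "" (fks.map (fun p =>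
      "\n\nclass " ++ p.2 ++ "Serializer(serializers.ModelSerializer):\n    class Meta:\n        model = " ++ p.2 ++ "\n        fields = '__all__'\n"))
  "class " ++ name ++ "Serializer(serializers.ModelSerializer):\n" ++ body
    ++ "    class Meta:\n" ++ ("        model = " ++ name ++ "\n") ++ "        fields = '__all__'\n" ++ nested

-- ===== PRECONDITION & SPEC =====
-- Pre_ excludes fields lists with duplicate keys: such a list does not represent a Python
-- dict (dict construction collapses duplicates before A ever sees them), so the ports'
-- pair-by-pair iteration does not model A's dict iteration there.
def Pre_write_serializer (name : String) (fields : List (String × String)) : Prop :=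
  (fields.map Prod.fst).Nodup
instance (name : String) (fields : List (String × String)) : Decidable (Pre_write_serializer name fields) := by unfold Pre_write_serializer; infer_instance

def pvWitness_write_serializer : String × (List (String × String)) :=
  ("Book", [("author", "ForeignKey('Author', on_delete=models.CASCADE)"), ("title", "CharField(max_length=100)")])

def Spec_write_serializer (name : String) (fields : List (String × String)) (out : String) : Prop := out = write_serializer_alt name fields
instance (name : String) (fields : List (String × String)) (out : String) : Decidable (Spec_write_serializer name fields out) := by unfold Spec_write_serializer; infer_instance

-- ===== CLAIM (what is proved, stated in full; the proofs are below) =====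
def Claim_equal_write_serializer : Prop := ∀ (name : String) (fields : List (String × String)), Dom_write_serializer name fields → Pre_write_serializer name fields → Spec_write_serializer name fields (write_serializer name fields)

-- ===== LEMMAS AND PROOFS =====

theorem join_empty_cons (x : String) (xs : List String) :
    PySem.Str.join "" (x :: xs) = x ++ PySem.Str.join "" xs := by
  rw [← String.toList_inj]
  simp [PySem.Str.toList_join, PySem.Chars.join, List.intercalate]
  cases xs <;> simp

-- the nested serializer A emits via its recursive call with {} equals B's closed-form template
theorem block_eq (rm : String) :
    "\n\n" ++ wsFuel 0 rm []
      = "\n\nclass " ++ rm ++ "Serializer(serializers.ModelSerializer):\n    class Meta:\n        model = " ++ rm ++ "\n        fields = '__all__'\n" := by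
  rw [← String.toList_inj]
  simp [wsFuel]

-- A's single fold with paired accumulators splits into B's two joined maps
theorem loop_split (fs : List (String × String)) (sc nl : String) :
    fs.foldl
      (fun (acc : String × String) fp =>
        if PySem.Str.isIn "ForeignKey(" fp.2 then
          let rm := pvRelated fp.2
          (acc.1 ++ ("    " ++ fp.1 ++ " = " ++ rm ++ "Serializer(read_only=True)\n"),
           acc.2 ++ ("\n\n" ++ wsFuel 0 rm []))
        else acc)
      (sc, nl)
    = (sc ++ PySem.Str.join "" (((fs.filter (fun p => PySem.Str.isIn "ForeignKey(" p.2)).map (fun p => (p.1, pvRelated p.2))).map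
          (fun p => "    " ++ p.1 ++ " = " ++ p.2 ++ "Serializer(read_only=True)\n")),
       nl ++ PySem.Str.join "" (((fs.filter (fun p => PySem.Str.isIn "ForeignKey(" p.2)).map (fun p => (p.1, pvRelated p.2))).map
          (fun p => "\n\nclass " ++ p.2 ++ "Serializer(serializers.ModelSerializer):\n    class Meta:\n        model = " ++ p.2 ++ "\n        fields = '__all__'\n"))) := by
  induction fs generalizing sc nl with
  | nil => simp [PySem.Str.join, PySem.Chars.join, List.intercalate]
  | cons hd tl ih =>
    by_cases h : PySem.Str.isIn "ForeignKey(" hd.2 = true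
    · simp only [List.foldl_cons, List.filter_cons, h, if_pos, List.map_cons,
        join_empty_cons]
      rw [ih, Prod.mk.injEq]
      refine ⟨String.append_assoc .., ?_⟩
      rw [block_eq, ← String.toList_inj]
      simp
    · simp only [List.foldl_cons, List.filter_cons, h, ite_false, Bool.false_eq_true]
      exact ih sc nl

-- ===== VERDICT (by name: the statement is the Claim_ definition above) =====
theorem write_serializer_spec : Claim_equal_write_serializer := by
  intro name fields _ _
  unfold Spec_write_serializer write_serializer write_serializer_alt
  rw [wsFuel]
  simp only []
  rw [loop_split]
  rw [← String.toList_inj]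
  simp
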